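-- pv_equiv track=rewrite | github.com/yusuke124358/keiba | scripts/agent/run_experiment.py | _parse_arg
-- ===== SOURCE A (Python) =====
-- def _parse_arg(tokens: list[str], flag: str) -> str | None:
--     if flag in tokens:
--         i = tokens.index(flag)
--         return tokens[i + 1] if i + 1 < len(tokens) else None
--     prefix = flag + "="
--     for t in tokens:
--         if t.startswith(prefix):
--             return t[len(prefix) :]
--     return None
-- ===== SOURCE B (Python) =====
-- def _parse_arg(tokens: list[str], flag: str) -> str | None:
--     prefix = flag + "="
--     exact_i = None
--     prefix_val = None
--     for i, t in enumerate(tokens):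
--         if exact_i is None and t == flag:
--             exact_i = i
--         if prefix_val is None and t.startswith(prefix):
--             prefix_val = t[len(prefix):]
--     if exact_i is not None:
--         return tokens[exact_i + 1] if exact_i + 1 < len(tokens) else None
--     return prefix_val
-- ===== Notes on version B (the rewrite author's own statement) =====
-- stated objective: alternative
-- what changed: Replaces A's three separate scans (membership test, .index re-scan, then a prefix loop) by one enumerate pass maintaining two write-once accumulators: the first exact-match index and the first prefix-match value, combined after the loop with exact-match priority.
import Mathlib
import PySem

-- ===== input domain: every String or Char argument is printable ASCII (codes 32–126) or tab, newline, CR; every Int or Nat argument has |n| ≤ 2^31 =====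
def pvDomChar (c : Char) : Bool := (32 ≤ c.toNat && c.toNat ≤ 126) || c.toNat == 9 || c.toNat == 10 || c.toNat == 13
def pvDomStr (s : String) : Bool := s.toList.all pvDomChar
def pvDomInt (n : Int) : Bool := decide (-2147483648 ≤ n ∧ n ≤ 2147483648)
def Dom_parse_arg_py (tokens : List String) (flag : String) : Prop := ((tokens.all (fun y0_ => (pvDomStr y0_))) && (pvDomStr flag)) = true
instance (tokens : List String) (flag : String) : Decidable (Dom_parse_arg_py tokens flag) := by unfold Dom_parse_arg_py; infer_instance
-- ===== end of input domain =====

-- B replaces A's three scans (membership test, .index re-scan, prefix loop) by one enumerate pass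
-- with two write-once accumulators (first exact-match index, first prefix-match value); alternative decomposition, same cost.

-- ===== PORT A =====
-- the 'for t in tokens: if t.startswith(prefix): return t[len(prefix):]' loop of A
def parseA_loop (pref : String) : List String → Option String
  | [] => none
  | t :: ts =>
    if PySem.Str.startswith t pref then
      some (PySem.Str.slice t (some (PySem.Str.len pref)) none)
    else parseA_loop pref ts

def parse_arg_py (tokens : List String) (flag : String) : Option String :=
  if tokens.contains flag then
    match PySem.List.index? tokens flag with
    | some i => if i + 1 < tokens.length then PySem.List.pyGet? tokens ((i : Int) + 1) else none
    | none => none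
  else
    parseA_loop (flag ++ "=") tokens

-- ===== PORT B =====
-- one iteration of B's loop body over (i, t)
def parseB_step (flag pref : String) (acc : Option Int × Option String) (p : Int × String) :
    Option Int × Option String :=
  let acc1 := if acc.1.isNone && (p.2 == flag) then (some p.1, acc.2) else acc
  if acc1.2.isNone && PySem.Str.startswith p.2 pref then
    (acc1.1, some (PySem.Str.slice p.2 (some (PySem.Str.len pref)) none))
  else acc1

def parse_arg_py_alt (tokens : List String) (flag : String) : Option String :=
  let pref := flag ++ "="
  let st := (PySem.List.enumerate tokens 0).foldl (parseB_step flag pref) (none, none)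
  match st.1 with
  | some i => if i + 1 < (tokens.length : Int) then PySem.List.pyGet? tokens (i + 1) else none
  | none => st.2

-- ===== PRECONDITION & SPEC =====
def Spec_parse_arg_py (tokens : List String) (flag : String) (out : Option String) : Prop := out = parse_arg_py_alt tokens flag
instance (tokens : List String) (flag : String) (out : Option String) : Decidable (Spec_parse_arg_py tokens flag out) := by unfold Spec_parse_arg_py; infer_instance

-- ===== CLAIM (what is proved, stated in full; the proofs are below) =====
def Claim_equal_parse_arg_py : Prop := ∀ (tokens : List String) (flag : String), Dom_parse_arg_py tokens flag → Spec_parse_arg_py tokens flag (parse_arg_py tokens flag)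

-- ===== LEMMAS AND PROOFS =====

-- the two accumulators of B's step evolve independently, componentwise
theorem parseB_step_eq (flag pref : String) (e : Option Int) (p : Option String) (i : Int) (t : String) :
    parseB_step flag pref (e, p) (i, t)
      = ((if e.isNone && (t == flag) then some i else e),
         (if p.isNone && PySem.Str.startswith t pref then
            some (PySem.Str.slice t (some (PySem.Str.len pref)) none) else p)) := by
  unfold parseB_step
  by_cases h1 : (e.isNone && (t == flag)) = true
  · by_cases h2 : (p.isNone && PySem.Str.startswith t pref) = true
    · simp only [h1, h2, if_true]
    · simp only [h1, if_true, if_neg h2]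
  · by_cases h2 : (p.isNone && PySem.Str.startswith t pref) = true
    · simp only [h2, if_true, if_neg h1]
    · simp only [if_neg h1, if_neg h2]

-- the first component of B's fold state: index of the first exact match, offset by the start s
theorem parseB_foldl_fst (flag pref : String) (tokens : List String) (s : Int)
    (e0 : Option Int) (p0 : Option String) :
    ((PySem.List.enumerate tokens s).foldl (parseB_step flag pref) (e0, p0)).1
      = (e0.rec (Option.map (fun (k : Nat) => s + (k : Int)) (PySem.List.index? tokens flag)) some) := by
  induction tokens generalizing s e0 p0 with
  | nil =>
    cases e0 <;> simp [PySem.List.enumerate_nil, PySem.List.index?_eq_idxOf?]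
  | cons t ts ih =>
    rw [PySem.List.enumerate_cons]
    simp only [List.foldl_cons, parseB_step_eq, ih]
    by_cases ht : t = flag
    · have hbeq : (t == flag) = true := by simp [ht]
      have hix : PySem.List.index? (t :: ts) flag = some 0 := by
        rw [ht]; exact PySem.List.index?_cons_self flag ts
      rw [hix]
      cases e0 <;> simp [hbeq]
    · have hbeq : (t == flag) = false := by simp [ht]
      rw [PySem.List.index?_cons_of_ne _ ht]
      cases e0 with
      | some i => simp [hbeq]
      | none =>
        simp only [hbeq, Option.isNone_none, Bool.and_false, Bool.false_eq_true, if_false]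
        cases hix : PySem.List.index? ts flag with
        | none => simp
        | some k => simp; ring

-- the second component of B's fold state: the first prefix-match value, i.e. A's loop
theorem parseB_foldl_snd (flag pref : String) (tokens : List String) (s : Int)
    (e0 : Option Int) (p0 : Option String) :
    ((PySem.List.enumerate tokens s).foldl (parseB_step flag pref) (e0, p0)).2
      = (p0.rec (parseA_loop pref tokens) some) := by
  induction tokens generalizing s e0 p0 with
  | nil =>
    cases p0 <;> simp [PySem.List.enumerate_nil, parseA_loop]
  | cons t ts ih =>
    rw [PySem.List.enumerate_cons]
    simp only [List.foldl_cons, parseB_step_eq, ih]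
    cases p0 with
    | some v => simp
    | none =>
      by_cases hs : PySem.Str.startswith t pref = true
      · simp only [Option.isNone_none, Bool.true_and, hs, if_true]
        simp only [parseA_loop, hs, if_true]
      · have hs' : PySem.Str.startswith t pref = false := by
          cases hq : PySem.Str.startswith t pref
          · rfl
          · exact absurd hq hs
        simp only [Option.isNone_none, Bool.true_and, hs', Bool.false_eq_true, if_false]
        simp only [parseA_loop, hs', Bool.false_eq_true, if_false]

-- ===== VERDICT (by name: the statement is the Claim_ definition above) =====
theorem parse_arg_py_spec : Claim_equal_parse_arg_py := by
  intro tokens flag _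
  unfold Spec_parse_arg_py parse_arg_py parse_arg_py_alt
  by_cases hmem : flag ∈ tokens
  · obtain ⟨k, hk⟩ := Option.isSome_iff_exists.mp
      ((PySem.List.index?_isSome_iff tokens flag).mpr hmem)
    simp only [List.contains_iff_mem.mpr hmem, if_true, hk]
    rw [parseB_foldl_fst]
    simp only [Option.map_some, hk]
    have hz : (0 : Int) + (k : Int) = (k : Int) := by ring
    simp only [hz]
    by_cases hlt : k + 1 < tokens.length
    · have hlt' : (k : Int) + 1 < (tokens.length : Int) := by exact_mod_cast hlt
      simp [hlt, hlt']
    · have hlt' : ¬ ((k : Int) + 1 < (tokens.length : Int)) := by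
        intro h; exact hlt (by exact_mod_cast h)
      simp [hlt, hlt']
  · have hc : tokens.contains flag = false := by
      simp [hmem]
    have hix : PySem.List.index? tokens flag = none :=
      (PySem.List.index?_eq_none_iff tokens flag).mpr hmem
    simp only [hc, Bool.false_eq_true, if_false]
    rw [parseB_foldl_fst]
    simp only [hix, Option.map_none]
    rw [parseB_foldl_snd]
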